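-- pv_equiv track=rewrite | github.com/KMU-WINK/2020-02-Algorithm | 백준 단계별로 풀어보기/[함수] 백준 1065 - 한수.py | isometricSequence
-- ===== SOURCE A (Python) =====
-- def isometricSequence(value):
--     if value < 100:
--         return value
--
--     numbers = list(range(1, value + 1))
--     answer = 0
--
--     for number in numbers:
--         termList = []
--
--         for term in str(number):
--             termList.append(int(term))
--
--         if len(termList) < 3:
--             answer += 1
--         else:
--             checker = True
--             rate = termList[1] - termList[0]
--             for i in range(1, len(termList)):
--                 if termList[i] - termList[i - 1] != rate:
--                     checker = False
--                     break
--
--             if checker: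
--                 answer += 1
--
--     return answer
-- ===== SOURCE B (Python) =====
-- def isometricSequence(value):
--     # Count "hansu" (numbers whose decimal digits form an arithmetic progression)
--     # combinatorially: every one- or two-digit number qualifies, and each
--     # longer hansu is uniquely (first digit, common difference, length).
--     if value < 100:
--         return value
--     count = 99
--     top = len(str(value))
--     for first in range(1, 10):
--         for diff in range(-9, 10):
--             for n in range(3, top + 1):
--                 if all(0 <= first + i * diff <= 9 for i in range(n)):
--                     num = 0
--                     for i in range(n):
--                         num = num * 10 + first + i * diff
--                     if num <= value:
--                         count += 1
--     return count
-- ===== Notes on version B (the rewrite author's own statement) =====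
-- stated objective: faster
-- what changed: Instead of enumerating every candidate number up to value and testing its digits, B counts hansu combinatorially: all one- and two-digit numbers qualify, plus one per (first digit, common difference, length) triple whose digits stay in range and whose value does not exceed value.
import Mathlib
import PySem

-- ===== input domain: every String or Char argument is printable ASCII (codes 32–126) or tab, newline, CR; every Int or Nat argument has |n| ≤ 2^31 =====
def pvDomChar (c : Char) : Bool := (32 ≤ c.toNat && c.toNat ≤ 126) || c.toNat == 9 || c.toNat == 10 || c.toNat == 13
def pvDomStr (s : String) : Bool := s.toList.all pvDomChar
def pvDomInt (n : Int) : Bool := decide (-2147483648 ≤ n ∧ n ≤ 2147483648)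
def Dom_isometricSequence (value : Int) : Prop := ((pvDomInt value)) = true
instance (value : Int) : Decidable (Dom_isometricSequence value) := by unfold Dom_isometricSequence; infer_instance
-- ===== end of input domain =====

-- B replaces A's enumeration of every number up to `value` by a combinatorial count over
-- (first digit, common difference, length) triples; proved to return the same value everywhere.

-- ===== PORT A =====
-- Literal port of A. Python's int(term) is PySem.Int.ofChars? [term]; it never raises here
-- (term is always a decimal digit of str(number) with number ≥ 1), so .getD 0 is never taken.
def isometricSequence (value : Int) : Int :=
  if value < 100 then value
  else
    let numbers := PySem.List.pyRange 1 (value + 1)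
    numbers.foldl (fun answer number =>
      let termList : List Int := (PySem.Int.toChars number).foldl
        (fun tl term => tl ++ [(PySem.Int.ofChars? [term]).getD 0]) []
      if termList.length < 3 then answer + 1
      else
        let rate := PySem.List.pyGetD termList 1 0 - PySem.List.pyGetD termList 0 0
        -- for-loop with break, carried as the flag `checker` (once false it stays false)
        let checker := (PySem.List.pyRange 1 (termList.length : Int)).foldl
          (fun checker i =>
            if checker = true then
              if PySem.List.pyGetD termList i 0 - PySem.List.pyGetD termList (i - 1) 0 ≠ rate
              then false else checker
            else checker) true
        if checker then answer + 1 else answer) 0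

-- ===== PORT B =====
-- Literal port of B (Source B): 99 one/two-digit hansu plus one per valid (first, diff, n) triple.
def isometricSequence_alt (value : Int) : Int :=
  if value < 100 then value
  else
    let top : Int := ((PySem.Int.toChars value).length : Int)
    (PySem.List.pyRange 1 10).foldl (fun count first =>
      (PySem.List.pyRange (-9) 10).foldl (fun count diff =>
        (PySem.List.pyRange 3 (top + 1)).foldl (fun count n =>
          if (PySem.List.pyRange 0 n).all
              (fun i => decide (0 ≤ first + i * diff ∧ first + i * diff ≤ 9)) then
            let num := (PySem.List.pyRange 0 n).foldl
              (fun num i => num * 10 + first + i * diff) 0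
            if num ≤ value then count + 1 else count
          else count) count) count) 99

-- ===== PRECONDITION & SPEC =====
def Spec_isometricSequence (value : Int) (out : Int) : Prop := out = isometricSequence_alt value
instance (value : Int) (out : Int) : Decidable (Spec_isometricSequence value out) := by unfold Spec_isometricSequence; infer_instance

-- ===== CLAIM (what is proved, stated in full; the proofs are below) =====
def Claim_equal_isometricSequence : Prop := ∀ (value : Int), Dom_isometricSequence value → Spec_isometricSequence value (isometricSequence value)

-- ===== LEMMAS AND PROOFS =====

lemma toDigitsCore_eq (fuel : Nat) : ∀ (n : Nat) (ds : List Char), 0 < n → n < fuel →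
    Nat.toDigitsCore 10 fuel n ds = ((Nat.digits 10 n).map Nat.digitChar).reverse ++ ds := by
  induction fuel with
  | zero => omega
  | succ f ih =>
    intro n ds h0 h
    rw [Nat.toDigitsCore]
    rw [Nat.digits_def' (by norm_num : 1 < 10) h0]
    by_cases hq : n / 10 = 0
    · simp [hq]
    · rw [if_neg hq, ih (n / 10) _ (Nat.pos_of_ne_zero hq) (by omega)]
      simp

lemma toChars_eq (m : Int) (h : 0 < m) :
    PySem.Int.toChars m = ((Nat.digits 10 m.toNat).map Nat.digitChar).reverse := by
  rw [PySem.Int.toChars, if_neg (by omega), Nat.toDigits,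
    toDigitsCore_eq _ _ _ (by omega) (by omega)]
  simp

lemma ofChars_digitChar (v : Nat) (h : v < 10) :
    (PySem.Int.ofChars? [Nat.digitChar v]).getD 0 = (v : Int) := by
  interval_cases v <;> decide

lemma checker_foldl (Q : Int → Prop) [DecidablePred Q] (xs : List Int) : ∀ (b : Bool),
    xs.foldl (fun ch i => if ch = true then (if Q i then false else ch) else ch) b =
      (b && xs.all (fun i => !decide (Q i))) := by
  induction xs with
  | nil => simp
  | cons y ys ih =>
    intro b
    rw [List.foldl_cons]
    cases b
    · rw [if_neg Bool.false_ne_true, ih false]; simp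
    · rw [if_pos rfl]
      by_cases hq : Q y
      · rw [if_pos hq, ih false]; simp [hq]
      · rw [if_neg hq, ih true]; simp [hq]

def digitsZ (m : Int) : List Int := (Nat.digits 10 m.toNat).reverse.map (fun v : Nat => (v : Int))
def wlist (a d n : Int) : List Int := (PySem.List.pyRange 0 n).map (fun i => a + i * d)
def valZ (t : List Int) : Int := t.foldl (fun num x => num * 10 + x) 0
def numOf (a d n : Int) : Int :=
  (PySem.List.pyRange 0 n).foldl (fun num i => num * 10 + a + i * d) 0

lemma termList_eq (m : Int) (h : 0 < m) :
    (PySem.Int.toChars m).foldl (fun tl term => tl ++ [(PySem.Int.ofChars? [term]).getD 0]) [] =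
      digitsZ m := by
  rw [PySem.List.foldl_append_singleton_eq_map, toChars_eq m h]
  rw [digitsZ, List.map_reverse, List.map_reverse, List.map_map, List.nil_append]
  congr 1
  apply List.map_congr_left
  intro v hv
  exact ofChars_digitChar v (Nat.digits_lt_base (by norm_num) hv)

lemma digitsZ_mem (m : Int) (x : Int) (hx : x ∈ digitsZ m) : 0 ≤ x ∧ x ≤ 9 := by
  simp only [digitsZ, List.mem_map, List.mem_reverse] at hx
  obtain ⟨v, hv, rfl⟩ := hx
  have := Nat.digits_lt_base (by norm_num) hv
  omega


lemma valZ_append (t : List Int) (x : Int) : valZ (t ++ [x]) = valZ t * 10 + x := by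
  simp [valZ]

lemma valZ_ofDigits (u : List Nat) :
    valZ (u.map (fun v : Nat => (v : Int))) = ((Nat.ofDigits 10 u.reverse : Nat) : Int) := by
  induction u using List.reverseRecOn with
  | nil => simp [valZ, Nat.ofDigits_nil]
  | append_singleton u x ih =>
    rw [List.map_append, List.map_singleton, valZ_append, ih,
      show (u ++ [x]).reverse = x :: u.reverse by simp, Nat.ofDigits_cons]
    push_cast
    ring

lemma valZ_digitsZ (m : Int) (h : 0 ≤ m) : valZ (digitsZ m) = m := by
  rw [digitsZ, valZ_ofDigits, List.reverse_reverse, Nat.ofDigits_digits]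
  omega

lemma numOf_eq_valZ (a d n : Int) : numOf a d n = valZ (wlist a d n) := by
  rw [numOf, wlist, valZ, List.foldl_map]
  congr 1
  funext num i
  ring

lemma wlist_getD (a d n : Int) (j : Nat) (hj : (j : Int) < n) :
    (wlist a d n).getD j 0 = a + j * d := by
  rw [wlist, PySem.List.pyRange_one]
  rw [List.getD_eq_getElem _ _ (by simp; omega)]
  simp

lemma sum_map_pyRange_aux (f : Int → Int) (a : Int) (N : Nat) : ∀ (b : Int), b - a = N →
    ((PySem.List.pyRange a b).map f).sum = ∑ x ∈ Finset.Ico a b, f x := by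
  induction N with
  | zero =>
    intro b hb
    rw [show b = a by omega]
    simp
  | succ k ih =>
    intro b hb
    rw [show b = (b - 1) + 1 by ring, PySem.List.pyRange_one_succ_right (by omega)]
    rw [List.map_append, List.sum_append, ih (b - 1) (by omega)]
    rw [show Finset.Ico a (b - 1 + 1) = insert (b - 1) (Finset.Ico a (b - 1)) by
      ext x; simp [Finset.mem_Ico, Finset.mem_insert]; omega]
    rw [Finset.sum_insert (by simp [Finset.mem_Ico])]
    simp
    ring
lemma sum_map_pyRange (f : Int → Int) (a b : Int) :
    ((PySem.List.pyRange a b).map f).sum = ∑ x ∈ Finset.Ico a b, f x := by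
  by_cases h : a ≤ b
  · exact sum_map_pyRange_aux f a (b - a).toNat b (by omega)
  · rw [PySem.List.pyRange_one, Finset.Ico_eq_empty (by simp; omega)]
    simp [show (b - a).toNat = 0 by omega]

lemma wlist_len (a d n : Int) : (wlist a d n).length = n.toNat := by
  simp [wlist]

lemma digitsZ_valZ_w (a d n : Int) (ha : 1 ≤ a) (hn : 1 ≤ n)
    (hok : ∀ x ∈ wlist a d n, 0 ≤ x ∧ x ≤ 9) :
    digitsZ (valZ (wlist a d n)) = wlist a d n := by
  set w := wlist a d n with hw
  have hnonneg : ∀ x ∈ w, 0 ≤ x := fun x hx => (hok x hx).1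
  have hmapback : w.map (fun x => ((x.toNat : Nat) : Int)) = w := by
    apply List.map_congr_left ?_ |>.trans (List.map_id w)
    intro x hx; simp [Int.toNat_of_nonneg (hnonneg x hx)]
  have hcast : w = (w.map Int.toNat).map (fun v : Nat => (v : Int)) := by
    rw [List.map_map]; exact hmapback.symm
  have hlen : w.length = n.toNat := wlist_len a d n
  have hne : w.map Int.toNat ≠ [] := by
    have hl2 : (w.map Int.toNat).length = n.toNat := by simp [hlen]
    intro hcon
    rw [hcon] at hl2
    simp at hl2
    omega
  have hhead : (w.map Int.toNat).head hne = a.toNat := by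
    have h0 : w.getD 0 0 = a := by
      have := wlist_getD a d n 0 (by omega); simpa using this
    rw [List.head_eq_getElem_zero hne]
    rw [List.getElem_map]
    rw [← List.getD_eq_getElem w 0 (by simp [hlen]; omega)]
    rw [h0]
  have hvalz : valZ w = ((Nat.ofDigits 10 (w.map Int.toNat).reverse : Nat) : Int) := by
    conv_lhs => rw [hcast]
    exact valZ_ofDigits _
  have hdig : Nat.digits 10 (Nat.ofDigits 10 (w.map Int.toNat).reverse) =
      (w.map Int.toNat).reverse := by
    apply Nat.digits_ofDigits 10 (by norm_num)
    · intro l hl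
      simp only [List.mem_reverse, List.mem_map] at hl
      obtain ⟨x, hx, rfl⟩ := hl
      have := hok x hx; omega
    · intro hne'
      rw [List.getLast_reverse]
      rw [hhead]
      omega
  rw [digitsZ, hvalz]
  rw [Int.toNat_natCast, hdig, List.reverse_reverse]
  rw [List.map_map]
  exact hmapback

lemma arith_getD (t : List Int)
    (harith : ∀ j : Nat, j + 1 < t.length →
      t.getD (j+1) 0 - t.getD j 0 = t.getD 1 0 - t.getD 0 0) :
    ∀ i : Nat, i < t.length → t.getD i 0 = t.getD 0 0 + i * (t.getD 1 0 - t.getD 0 0) := by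
  intro i
  induction i with
  | zero => intro _; simp
  | succ j ih =>
    intro hj
    have h1 := harith j (by omega)
    have h2 := ih (by omega)
    push_cast
    linear_combination h1 + h2

lemma arith_eq_wlist (t : List Int)
    (harith : ∀ j : Nat, j + 1 < t.length →
      t.getD (j+1) 0 - t.getD j 0 = t.getD 1 0 - t.getD 0 0) :
    t = wlist (t.getD 0 0) (t.getD 1 0 - t.getD 0 0) (t.length : Int) := by
  apply List.ext_getElem
  · rw [wlist_len]; simp
  · intro i hi hi2
    rw [← List.getD_eq_getElem t 0 hi, ← List.getD_eq_getElem _ 0 hi2]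
    rw [wlist_getD _ _ _ i (by exact_mod_cast hi)]
    exact arith_getD t harith i hi

def hAb (m : Int) : Bool :=
  let termList : List Int := (PySem.Int.toChars m).foldl
    (fun tl term => tl ++ [(PySem.Int.ofChars? [term]).getD 0]) []
  if termList.length < 3 then true
  else
    let rate := PySem.List.pyGetD termList 1 0 - PySem.List.pyGetD termList 0 0
    (PySem.List.pyRange 1 (termList.length : Int)).foldl
      (fun checker i =>
        if checker = true then
          if PySem.List.pyGetD termList i 0 - PySem.List.pyGetD termList (i - 1) 0 ≠ rate
          then false else checker
        else checker) true


lemma digitsZ_len_lt (m : Int) (k : Nat) :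
    (digitsZ m).length ≤ k ↔ m.toNat < 10 ^ k := by
  rw [digitsZ]; simp [Nat.digits_length_le_iff (by norm_num : (1:Nat) < 10)]

lemma hAb_small (m : Int) (h : 0 < m) (h2 : m < 100) : hAb m = true := by
  rw [hAb]
  simp only [termList_eq m h]
  rw [if_pos]
  have := (digitsZ_len_lt m 2).2 (by omega)
  omega

lemma hAb_iff (m : Int) (h : 100 ≤ m) :
    hAb m = true ↔ ∀ j : Nat, j + 1 < (digitsZ m).length →
      (digitsZ m).getD (j+1) 0 - (digitsZ m).getD j 0 =
        (digitsZ m).getD 1 0 - (digitsZ m).getD 0 0 := by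
  rw [hAb]
  simp only [termList_eq m (by omega)]
  set t := digitsZ m with ht
  have hlen : ¬ t.length < 3 := by
    intro hcon
    have := (digitsZ_len_lt m 2).1 (by rw [← ht]; omega)
    omega
  rw [if_neg hlen]
  rw [checker_foldl (fun i => PySem.List.pyGetD t i 0 - PySem.List.pyGetD t (i - 1) 0 ≠
    (PySem.List.pyGetD t 1 0 - PySem.List.pyGetD t 0 0)) _ true]
  rw [Bool.true_and, List.all_eq_true]
  constructor
  · intro hall j hj
    have hmem : ((j : Int) + 1) ∈ PySem.List.pyRange 1 (t.length : Int) := by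
      rw [PySem.List.mem_pyRange_one]; constructor <;> [omega; exact_mod_cast (by omega : (j:Int) + 1 < (t.length : Int))]
    have := hall _ hmem
    simp only [Bool.not_eq_eq_eq_not, Bool.not_true, decide_eq_false_iff_not, not_not] at this
    rw [PySem.List.pyGetD_of_nonneg _ _ (by omega), PySem.List.pyGetD_of_nonneg _ _ (by omega),
      PySem.List.pyGetD_of_nonneg _ _ (by omega), PySem.List.pyGetD_of_nonneg _ _ (by omega)] at this
    simpa using this
  · intro harith i hi
    rw [PySem.List.mem_pyRange_one] at hi
    simp only [Bool.not_eq_eq_eq_not, Bool.not_true, decide_eq_false_iff_not, not_not]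
    have hj : i.toNat - 1 + 1 < t.length := by omega
    have h5 := harith (i.toNat - 1) hj
    rw [PySem.List.pyGetD_of_nonneg _ _ (by omega), PySem.List.pyGetD_of_nonneg _ _ (by omega),
      PySem.List.pyGetD_of_nonneg _ _ (by omega), PySem.List.pyGetD_of_nonneg _ _ (by omega)]
    rw [show i.toNat - 1 + 1 = i.toNat by omega] at h5
    rw [show (i - 1).toNat = i.toNat - 1 by omega]
    norm_num
    exact h5

def okDigits (a d n : Int) : Bool :=
  (PySem.List.pyRange 0 n).all (fun i => decide (0 ≤ a + i * d ∧ a + i * d ≤ 9))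

lemma A_count (v : Int) (h : 100 ≤ v) :
    isometricSequence v = ∑ x ∈ Finset.Ico (1 : Int) (v + 1), (if hAb x then 1 else 0) := by
  rw [isometricSequence, if_neg (by omega)]
  rw [PySem.List.foldl_congr_mem (PySem.List.pyRange 1 (v + 1)) _
    (fun acc x => if hAb x = true then acc + 1 else acc) 0 ?hcong]
  case hcong =>
    intro acc x _
    simp only [hAb]
    split_ifs <;> simp_all
  rw [PySem.List.foldl_count_if]
  rw [← PySem.List.sum_map_ite_one_zero, sum_map_pyRange]
  simp

lemma B_count (v : Int) (h : 100 ≤ v) :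
    isometricSequence_alt v = 99 +
      ∑ a ∈ Finset.Ico (1 : Int) 10, ∑ d ∈ Finset.Ico (-9 : Int) 10,
        ∑ n ∈ Finset.Ico (3 : Int) (((PySem.Int.toChars v).length : Int) + 1),
          (if okDigits a d n = true ∧ numOf a d n ≤ v then 1 else 0) := by
  rw [isometricSequence_alt, if_neg (by omega)]
  have inner : ∀ (c first diff : Int),
      (PySem.List.pyRange 3 (((PySem.Int.toChars v).length : Int) + 1)).foldl
        (fun count n =>
          if (PySem.List.pyRange 0 n).all
              (fun i => decide (0 ≤ first + i * diff ∧ first + i * diff ≤ 9)) then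
            let num := (PySem.List.pyRange 0 n).foldl
              (fun num i => num * 10 + first + i * diff) 0
            if num ≤ v then count + 1 else count
          else count) c
      = c + ∑ n ∈ Finset.Ico (3 : Int) (((PySem.Int.toChars v).length : Int) + 1),
          (if okDigits first diff n = true ∧ numOf first diff n ≤ v then 1 else 0) := by
    intro c first diff
    rw [PySem.List.foldl_congr_mem _ _
      (fun count n => count + if okDigits first diff n = true ∧ numOf first diff n ≤ v then 1 else 0) c ?hc]
    case hc =>
      intro acc n _
      show (if okDigits first diff n = true
          then (if numOf first diff n ≤ v then acc + 1 else acc) else acc)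
        = acc + (if okDigits first diff n = true ∧ numOf first diff n ≤ v then 1 else 0)
      by_cases h1 : okDigits first diff n = true
      · by_cases h2 : numOf first diff n ≤ v <;> simp [h1, h2]
      · simp [h1]
    rw [PySem.List.foldl_add, sum_map_pyRange]
  have middle : ∀ (c first : Int),
      (PySem.List.pyRange (-9) 10).foldl (fun count diff =>
        (PySem.List.pyRange 3 (((PySem.Int.toChars v).length : Int) + 1)).foldl
          (fun count n =>
            if (PySem.List.pyRange 0 n).all
                (fun i => decide (0 ≤ first + i * diff ∧ first + i * diff ≤ 9)) then
              let num := (PySem.List.pyRange 0 n).foldl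
                (fun num i => num * 10 + first + i * diff) 0
              if num ≤ v then count + 1 else count
            else count) count) c
      = c + ∑ d ∈ Finset.Ico (-9 : Int) 10,
          ∑ n ∈ Finset.Ico (3 : Int) (((PySem.Int.toChars v).length : Int) + 1),
            (if okDigits first d n = true ∧ numOf first d n ≤ v then 1 else 0) := by
    intro c first
    rw [PySem.List.foldl_congr_mem _ _
      (fun count diff => count + ∑ n ∈ Finset.Ico (3 : Int) (((PySem.Int.toChars v).length : Int) + 1),
        (if okDigits first diff n = true ∧ numOf first diff n ≤ v then 1 else 0)) c ?hc2]
    case hc2 =>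
      intro acc d _
      exact inner acc first d
    rw [PySem.List.foldl_add, sum_map_pyRange]
  rw [PySem.List.foldl_congr_mem _ _
    (fun count first => count + ∑ d ∈ Finset.Ico (-9 : Int) 10,
      ∑ n ∈ Finset.Ico (3 : Int) (((PySem.Int.toChars v).length : Int) + 1),
        (if okDigits first d n = true ∧ numOf first d n ≤ v then 1 else 0)) 99 ?hc3]
  case hc3 =>
    intro acc first _
    exact middle acc first
  rw [PySem.List.foldl_add, sum_map_pyRange]

lemma okDigits_iff (a d n : Int) :
    okDigits a d n = true ↔ ∀ i : Int, 0 ≤ i → i < n → 0 ≤ a + i * d ∧ a + i * d ≤ 9 := by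
  rw [okDigits, List.all_eq_true]
  constructor
  · intro hall i h0 h1
    have := hall i (by rw [PySem.List.mem_pyRange_one]; omega)
    simpa using this
  · intro hf i hi
    rw [PySem.List.mem_pyRange_one] at hi
    simpa using hf i hi.1 hi.2

lemma wlist_mem_bounds (a d n : Int) (hok : okDigits a d n = true) :
    ∀ x ∈ wlist a d n, 0 ≤ x ∧ x ≤ 9 := by
  intro x hx
  rw [wlist, List.mem_map] at hx
  obtain ⟨i, hi, rfl⟩ := hx
  rw [PySem.List.mem_pyRange_one] at hi
  exact (okDigits_iff a d n).1 hok i hi.1 hi.2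

lemma triple_facts (a d n : Int) (ha : 1 ≤ a) (hn : 3 ≤ n)
    (hok : okDigits a d n = true) :
    digitsZ (numOf a d n) = wlist a d n ∧ 100 ≤ numOf a d n ∧ hAb (numOf a d n) = true := by
  have hokm := wlist_mem_bounds a d n hok
  have hdg : digitsZ (numOf a d n) = wlist a d n := by
    rw [numOf_eq_valZ]
    exact digitsZ_valZ_w a d n ha (by omega) hokm
  have hlen : (digitsZ (numOf a d n)).length = n.toNat := by rw [hdg, wlist_len]
  have h100 : 100 ≤ numOf a d n := by
    have hnot : ¬ (digitsZ (numOf a d n)).length ≤ 2 := by omega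
    rw [digitsZ_len_lt] at hnot
    omega
  refine ⟨hdg, h100, ?_⟩
  rw [hAb_iff _ h100]
  intro j hj
  rw [hdg] at hj ⊢
  rw [wlist_len] at hj
  rw [wlist_getD a d n (j+1) (by omega), wlist_getD a d n j (by omega),
    wlist_getD a d n 1 (by omega), wlist_getD a d n 0 (by omega)]
  push_cast
  ring

lemma triple_inj (a d n a' d' n' : Int) (ha : 1 ≤ a) (hn : 3 ≤ n) (ha' : 1 ≤ a') (hn' : 3 ≤ n')
    (hok : okDigits a d n = true) (hok' : okDigits a' d' n' = true)
    (heq : numOf a d n = numOf a' d' n') :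
    a = a' ∧ d = d' ∧ n = n' := by
  have h1 := (triple_facts a d n ha hn hok).1
  have h2 := (triple_facts a' d' n' ha' hn' hok').1
  rw [heq, h2] at h1
  have hlen : n'.toNat = n.toNat := by
    have := congrArg List.length h1
    rwa [wlist_len, wlist_len] at this
  have hnn : n = n' := by omega
  have h0 : a' = a := by
    have e0 : (wlist a' d' n').getD 0 0 = (wlist a d n).getD 0 0 := by rw [h1]
    rw [wlist_getD a' d' n' 0 (by omega), wlist_getD a d n 0 (by omega)] at e0
    norm_num at e0
    exact e0
  have hone : a' + d' = a + d := by
    have e1 : (wlist a' d' n').getD 1 0 = (wlist a d n).getD 1 0 := by rw [h1]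
    rw [wlist_getD a' d' n' 1 (by omega), wlist_getD a d n 1 (by omega)] at e1
    norm_num at e1
    omega
  exact ⟨h0.symm, by omega, hnn⟩

lemma digitsZ_getD_mem (m : Int) (j : Nat) (hj : j < (digitsZ m).length) :
    0 ≤ (digitsZ m).getD j 0 ∧ (digitsZ m).getD j 0 ≤ 9 := by
  apply digitsZ_mem m
  rw [List.getD_eq_getElem _ _ hj]
  exact List.getElem_mem hj

lemma digitsZ_lead (m : Int) (h : 100 ≤ m) : 1 ≤ (digitsZ m).getD 0 0 := by
  have hne : Nat.digits 10 m.toNat ≠ [] := by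
    rw [Nat.digits_ne_nil_iff_ne_zero]; omega
  have hlast := Nat.getLast_digit_ne_zero 10 (show m.toNat ≠ 0 by omega)
  have hkey : (digitsZ m).getD 0 0 = ((Nat.digits 10 m.toNat).getLast hne : Int) := by
    rw [digitsZ]
    rw [List.getD_eq_getElem _ _ (by simpa [List.length_pos_iff] using hne)]
    rw [List.getElem_map, List.getElem_reverse]
    simp [List.getLast_eq_getElem]
  rw [hkey]
  omega

lemma surj_facts (v x : Int) (hv : 100 ≤ v) (hx : 100 ≤ x) (hxv : x ≤ v)
    (hab : hAb x = true) :
    ∃ a d n : Int, (1 ≤ a ∧ a < 10) ∧ (-9 ≤ d ∧ d < 10) ∧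
      (3 ≤ n ∧ n < ((PySem.Int.toChars v).length : Int) + 1) ∧
      okDigits a d n = true ∧ numOf a d n = x := by
  set t := digitsZ x with ht
  have hL3 : 3 ≤ t.length := by
    by_contra hcon
    have := (digitsZ_len_lt x 2).1 (by rw [← ht]; omega)
    omega
  have harith := (hAb_iff x hx).1 hab
  rw [← ht] at harith
  set a := t.getD 0 0 with ha
  set d := t.getD 1 0 - t.getD 0 0 with hd
  have hb0 := digitsZ_getD_mem x 0 (by rw [← ht]; omega)
  have hb1 := digitsZ_getD_mem x 1 (by rw [← ht]; omega)
  rw [← ht] at hb0 hb1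
  have hlead : 1 ≤ a := by rw [ha, ht]; exact digitsZ_lead x hx
  have hteq : t = wlist a d (t.length : Int) := arith_eq_wlist t harith
  refine ⟨a, d, (t.length : Int), ⟨hlead, by omega⟩, ⟨by omega, by omega⟩, ⟨by exact_mod_cast hL3, ?_⟩, ?_, ?_⟩
  · -- length bound
    have hxv' : (Nat.digits 10 x.toNat).length ≤ (Nat.digits 10 v.toNat).length :=
      Nat.le_length_digits_le 10 x.toNat v.toNat (by omega)
    have htop : (PySem.Int.toChars v).length = (Nat.digits 10 v.toNat).length := by
      rw [toChars_eq v (by omega)]; simp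
    have hlt : t.length = (Nat.digits 10 x.toNat).length := by rw [ht, digitsZ]; simp
    rw [htop, hlt]
    omega
  · -- okDigits
    rw [okDigits_iff]
    intro i h0 h1
    have hj : i.toNat < t.length := by omega
    have := digitsZ_getD_mem x i.toNat (by rw [← ht]; omega)
    rw [← ht] at this
    have hgd : t.getD i.toNat 0 = a + i * d := by
      conv_lhs => rw [hteq]
      rw [wlist_getD a d (t.length : Int) i.toNat (by omega)]
      congr 2
      omega
    rw [← hgd]
    exact this
  · rw [numOf_eq_valZ, ← hteq, ht]
    exact valZ_digitsZ x (by omega)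

lemma main_bij (v : Int) (h : 100 ≤ v) :
    ∑ x ∈ Finset.Ico (100 : Int) (v + 1), (if hAb x then (1:Int) else 0) =
      ∑ a ∈ Finset.Ico (1 : Int) 10, ∑ d ∈ Finset.Ico (-9 : Int) 10,
        ∑ n ∈ Finset.Ico (3 : Int) (((PySem.Int.toChars v).length : Int) + 1),
          (if okDigits a d n = true ∧ numOf a d n ≤ v then (1:Int) else 0) := by
  have hrhs : ∑ a ∈ Finset.Ico (1 : Int) 10, ∑ d ∈ Finset.Ico (-9 : Int) 10,
        ∑ n ∈ Finset.Ico (3 : Int) (((PySem.Int.toChars v).length : Int) + 1),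
          (if okDigits a d n = true ∧ numOf a d n ≤ v then (1:Int) else 0)
      = ∑ p ∈ (Finset.Ico (1 : Int) 10) ×ˢ ((Finset.Ico (-9 : Int) 10) ×ˢ
          (Finset.Ico (3 : Int) (((PySem.Int.toChars v).length : Int) + 1))),
          (if okDigits p.1 p.2.1 p.2.2 = true ∧ numOf p.1 p.2.1 p.2.2 ≤ v then (1:Int) else 0) := by
    rw [eq_comm, Finset.sum_product]
    refine Finset.sum_congr rfl (fun a _ => ?_)
    rw [Finset.sum_product]
  rw [hrhs, Finset.sum_boole, Finset.sum_boole]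
  congr 1
  apply Finset.card_bij (fun p _ => numOf p.1 p.2.1 p.2.2) ?_ ?_ ?_ |>.symm
  · -- maps into
    intro p hp
    simp only [Finset.mem_filter, Finset.mem_product, Finset.mem_Ico] at hp
    obtain ⟨⟨⟨ha1, ha2⟩, ⟨hd1, hd2⟩, hn1, hn2⟩, hok, hle⟩ := hp
    obtain ⟨_, h100, habt⟩ := triple_facts p.1 p.2.1 p.2.2 ha1 hn1 hok
    simp only [Finset.mem_filter, Finset.mem_Ico]
    exact ⟨⟨h100, by omega⟩, habt⟩
  · -- injective
    intro p hp q hq heq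
    simp only [Finset.mem_filter, Finset.mem_product, Finset.mem_Ico] at hp hq
    obtain ⟨⟨⟨ha1, _⟩, ⟨_, _⟩, hn1, _⟩, hok, _⟩ := hp
    obtain ⟨⟨⟨ha1', _⟩, ⟨_, _⟩, hn1', _⟩, hok', _⟩ := hq
    obtain ⟨e1, e2, e3⟩ := triple_inj p.1 p.2.1 p.2.2 q.1 q.2.1 q.2.2 ha1 hn1 ha1' hn1' hok hok' heq
    exact Prod.ext e1 (Prod.ext e2 e3)
  · -- surjective
    intro x hx
    simp only [Finset.mem_filter, Finset.mem_Ico] at hx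
    obtain ⟨⟨h100, hlt⟩, hab⟩ := hx
    obtain ⟨a, d, n, ⟨ha1, ha2⟩, ⟨hd1, hd2⟩, ⟨hn1, hn2⟩, hok, heq⟩ :=
      surj_facts v x h h100 (by omega) hab
    refine ⟨(a, d, n), ?_, heq⟩
    simp only [Finset.mem_filter, Finset.mem_product, Finset.mem_Ico]
    exact ⟨⟨⟨ha1, ha2⟩, ⟨hd1, hd2⟩, hn1, hn2⟩, hok, by omega⟩


lemma hAb_small_sum : ∑ x ∈ Finset.Ico (1 : Int) 100, (if hAb x then (1:Int) else 0) = 99 := by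
  rw [Finset.sum_congr rfl (fun x hx => ?_)]
  · exact Finset.sum_const 1 |>.trans (by simp [Int.card_Ico])
  · rw [Finset.mem_Ico] at hx
    rw [if_pos (hAb_small x (by omega) (by omega))]

-- ===== VERDICT (by name: the statement is the Claim_ definition above) =====
theorem isometricSequence_spec : Claim_equal_isometricSequence := by
  intro v _
  unfold Spec_isometricSequence
  by_cases hv : v < 100
  · simp [isometricSequence, isometricSequence_alt, hv]
  · rw [not_lt] at hv
    rw [A_count v hv, B_count v hv, ← main_bij v hv, ← hAb_small_sum]
    rw [← Finset.sum_union (by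
      simp [Finset.disjoint_left, Finset.mem_Ico]; omega)]
    rw [Finset.Ico_union_Ico_eq_Ico (by omega) (by omega)]
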